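-- pv_equiv track=rewrite | github.com/awhittle3/pyBattleship | enemyAI.py | targetingGuess
-- ===== SOURCE A (Python) =====
-- def targetingGuess(i, vector, board):
--     n = addVectors(i, vector)
--     if board[n[0]][n[1]] == "o":
--         #It's a hit!
--         board[n[0]][n[1]] = "*"
--     elif board[n[0]][n[1]] == "~":
--         #It's a miss
--         board[n[0]][n[1]] = "X"
--     else:
--         i = addVectors(i,vector)
--         i = targetingGuess(i, vector, board)
--     return i
--
-- def addVectors(i, j):
--     n = []
--     n.append(i[0] + j[0])
--     n.append(i[1] + j[1])
--     return n
-- ===== SOURCE B (Python) =====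
-- def targetingGuess(i, vector, board):
--     # Iterative position arithmetic instead of recursion: step k along the vector
--     # until the first 'o' (hit -> '*') or '~' (miss -> 'X'); mutates board like A;
--     # returns the cell just before the marked one (the original i on the first step).
--     dr, dc = vector[0], vector[1]
--     k = 1
--     while True:
--         r, c = i[0] + k * dr, i[1] + k * dc
--         cell = board[r][c]
--         if cell in ("o", "~"):
--             board[r][c] = "*" if cell == "o" else "X"
--             return i if k == 1 else [r - dr, c - dc]
--         k += 1
-- ===== Notes on version B (the rewrite author's own statement) =====
-- stated objective: alternative
-- what changed: Replaces A's tail recursion that rebuilds a fresh 2-element position list via addVectors at every step with an iterative while-loop over the step count k, computing each probed cell's coordinates arithmetically as i + k*vector and returning i + (k-1)*vector directly (the original i object on a first-step hit).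
import Mathlib
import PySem

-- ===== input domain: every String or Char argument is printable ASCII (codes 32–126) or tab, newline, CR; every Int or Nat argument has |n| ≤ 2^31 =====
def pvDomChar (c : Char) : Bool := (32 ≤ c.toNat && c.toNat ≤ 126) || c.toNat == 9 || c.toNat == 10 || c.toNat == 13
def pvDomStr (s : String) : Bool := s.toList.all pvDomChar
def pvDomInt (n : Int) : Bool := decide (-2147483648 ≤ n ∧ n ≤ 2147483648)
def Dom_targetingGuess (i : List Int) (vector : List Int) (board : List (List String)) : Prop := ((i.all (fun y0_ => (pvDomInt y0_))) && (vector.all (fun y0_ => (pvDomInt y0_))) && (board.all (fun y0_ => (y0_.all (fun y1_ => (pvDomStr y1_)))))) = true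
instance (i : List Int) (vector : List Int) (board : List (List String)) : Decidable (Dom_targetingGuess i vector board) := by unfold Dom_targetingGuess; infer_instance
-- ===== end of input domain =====

-- B replaces A's tail recursion (which rebuilds a fresh 2-element position list every step via
-- addVectors) by an iterative scan over the step count k with direct position arithmetic.
-- Both A and B mutate board[..] at the found cell identically in Python; the equivalence proved
-- here is about the RETURN value (the mutation happens after the result is determined and never
-- influences it).

-- ===== PORT A =====
-- board[r][c] with Python (possibly negative) indexing; none = IndexError (excluded by Pre_).
def pvCell (board : List (List String)) (r c : Int) : Option String :=
  match PySem.List.pyGet? board r with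
  | some row => PySem.List.pyGet? row c
  | none => none

-- addVectors(i, j); i[0]/i[1] are exact under Pre_ (2 ≤ length).
def pvAddVectors (i j : List Int) : List Int :=
  [PySem.List.pyGetD i 0 0 + PySem.List.pyGetD j 0 0,
   PySem.List.pyGetD i 1 0 + PySem.List.pyGetD j 1 0]

-- fuel bound: more than the number of distinct valid board positions, so under Pre_ the walk
-- always terminates before the fuel runs out (the fuel-0 value is never reached inside Pre_).
def pvFuel (board : List (List String)) : Nat := 4 * (board.map List.length).sum + 2

-- literal transliteration of A's recursion, made total by fuel (Python raises/diverges exactly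
-- where the fuel case or a none cell is reached; both are outside Pre_).
def pvTgA : Nat → List Int → List Int → List (List String) → List Int
  | 0, i, _, _ => i
  | fuel+1, i, vector, board =>
    let n := pvAddVectors i vector
    match pvCell board (PySem.List.pyGetD n 0 0) (PySem.List.pyGetD n 1 0) with
    | some s =>
      if s = "o" then i
      else if s = "~" then i
      else pvTgA fuel (pvAddVectors i vector) vector board
    | none => pvTgA fuel (pvAddVectors i vector) vector board

def targetingGuess (i : List Int) (vector : List Int) (board : List (List String)) : List Int :=
  pvTgA (pvFuel board) i vector board

-- ===== PORT B =====
-- B's while loop over the step count k (position computed arithmetically from the start).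
def pvTgB : Nat → Int → Int → Int → Int → Int → List Int → List (List String) → List Int
  | 0, _, _, _, _, _, i, _ => i
  | fuel+1, k, i0, i1, dr, dc, i, board =>
    let r := i0 + k * dr
    let c := i1 + k * dc
    match pvCell board r c with
    | some s =>
      if s = "o" ∨ s = "~" then (if k = 1 then i else [r - dr, c - dc])
      else pvTgB fuel (k+1) i0 i1 dr dc i board
    | none => pvTgB fuel (k+1) i0 i1 dr dc i board

def targetingGuess_alt (i : List Int) (vector : List Int) (board : List (List String)) : List Int :=
  pvTgB (pvFuel board) 1
    (PySem.List.pyGetD i 0 0) (PySem.List.pyGetD i 1 0)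
    (PySem.List.pyGetD vector 0 0) (PySem.List.pyGetD vector 1 0) i board

-- ===== PRECONDITION & SPEC =====
-- step t is a hit/miss cell ('o' or '~')
def pvHitB (board : List (List String)) (i0 i1 dr dc t : Int) : Bool :=
  pvCell board (i0 + t * dr) (i1 + t * dc) = some "o" ||
  pvCell board (i0 + t * dr) (i1 + t * dc) = some "~"

-- step t is a valid cell that is neither 'o' nor '~' (walked over without raising)
def pvOkB (board : List (List String)) (i0 i1 dr dc t : Int) : Bool :=
  match pvCell board (i0 + t * dr) (i1 + t * dc) with
  | some s => !(s = "o") && !(s = "~")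
  | none => false

-- Pre_: exactly the inputs on which Python A returns: i and vector have ≥ 2 entries and, walking
-- from i by vector, some step k+1 lands on 'o'/'~' with every earlier step a valid plain cell
-- (otherwise A raises IndexError or recurses forever; k < pvFuel board is no restriction — a
-- terminating walk visits distinct valid positions, of which there are fewer than pvFuel board).
def Pre_targetingGuess (i : List Int) (vector : List Int) (board : List (List String)) : Prop :=
  2 ≤ i.length ∧ 2 ≤ vector.length ∧
  ((List.range (pvFuel board)).any (fun k =>
    pvHitB board (PySem.List.pyGetD i 0 0) (PySem.List.pyGetD i 1 0)
      (PySem.List.pyGetD vector 0 0) (PySem.List.pyGetD vector 1 0) (k+1 : Nat) &&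
    (List.range k).all (fun j =>
      pvOkB board (PySem.List.pyGetD i 0 0) (PySem.List.pyGetD i 1 0)
        (PySem.List.pyGetD vector 0 0) (PySem.List.pyGetD vector 1 0) (j+1 : Nat)))) = true
instance (i : List Int) (vector : List Int) (board : List (List String)) : Decidable (Pre_targetingGuess i vector board) := by unfold Pre_targetingGuess; infer_instance

def pvWitness_targetingGuess : List Int × List Int × List (List String) :=
  ([0, 0], [0, 1], [["s", "s", "o"], ["~", "~", "~"]])

def Spec_targetingGuess (i : List Int) (vector : List Int) (board : List (List String)) (out : List Int) : Prop := out = targetingGuess_alt i vector board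
instance (i : List Int) (vector : List Int) (board : List (List String)) (out : List Int) : Decidable (Spec_targetingGuess i vector board out) := by unfold Spec_targetingGuess; infer_instance

-- ===== CLAIM (what is proved, stated in full; the proofs are below) =====
def Claim_equal_targetingGuess : Prop := ∀ (i : List Int) (vector : List Int) (board : List (List String)), Dom_targetingGuess i vector board → Pre_targetingGuess i vector board → Spec_targetingGuess i vector board (targetingGuess i vector board)

-- ===== LEMMAS AND PROOFS =====

-- pyGetD on the 2-element position lists the programs build
theorem pvGet0 (a b : Int) : PySem.List.pyGetD [a, b] 0 0 = a := rfl
theorem pvGet1 (a b : Int) : PySem.List.pyGetD [a, b] 1 0 = b := rfl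

theorem loop_eq (board : List (List String)) (iOrig v : List Int) (i0 i1 dr dc : Int)
    (hv0 : PySem.List.pyGetD v 0 0 = dr) (hv1 : PySem.List.pyGetD v 1 0 = dc) :
    ∀ (fuel : Nat) (m K : Nat), 1 ≤ m → m < K → K ≤ m + fuel →
    pvHitB board i0 i1 dr dc (K : Int) = true →
    (∀ u : Nat, m < u → u < K → pvOkB board i0 i1 dr dc (u : Int) = true) →
    pvTgA fuel [i0 + m * dr, i1 + m * dc] v board =
      pvTgB fuel ((m : Int) + 1) i0 i1 dr dc iOrig board := by
  intro fuel
  induction fuel with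
  | zero => intro m K _ h1 h2; omega
  | succ fuel ih =>
    intro m K hm hmK hKf hhit hok
    have hadd : pvAddVectors [i0 + (m:Int) * dr, i1 + (m:Int) * dc] v
        = [i0 + ((m:Int) + 1) * dr, i1 + ((m:Int) + 1) * dc] := by
      simp only [pvAddVectors, pvGet0, pvGet1, hv0, hv1, List.cons.injEq, and_true]
      constructor <;> ring
    have hk1 : ¬ ((m:Int) + 1 = 1) := by omega
    by_cases hK : K = m + 1
    · -- the next cell is the hit/miss: both return the current position
      subst hK
      simp only [pvHitB, Bool.or_eq_true, decide_eq_true_eq] at hhit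
      push_cast at hhit
      rcases hhit with h | h <;>
      · simp only [pvTgA, pvTgB, hadd, pvGet0, pvGet1, h]
        simp [hk1]
        constructor <;> ring
    · -- the next cell is a plain valid cell: both advance
      have hokm1 : pvOkB board i0 i1 dr dc ((m:Int) + 1) = true := by
        have := hok (m+1) (by omega) (by omega); push_cast at this; exact this
      unfold pvOkB at hokm1
      rcases hc : pvCell board (i0 + ((m:Int)+1) * dr) (i1 + ((m:Int)+1) * dc) with _ | s
      · rw [hc] at hokm1; simp at hokm1
      · rw [hc] at hokm1; simp at hokm1
        obtain ⟨hso, hss⟩ := hokm1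
        have step : pvTgA (fuel+1) [i0 + (m:Int) * dr, i1 + (m:Int) * dc] v board
            = pvTgA fuel [i0 + ((m:Int)+1) * dr, i1 + ((m:Int)+1) * dc] v board := by
          simp only [pvTgA, hadd, pvGet0, pvGet1, hc]
          simp [hso, hss]
        have stepB : pvTgB (fuel+1) ((m:Int) + 1) i0 i1 dr dc iOrig board
            = pvTgB fuel ((m:Int) + 1 + 1) i0 i1 dr dc iOrig board := by
          simp only [pvTgB, hc]
          simp [hso, hss]
        rw [step, stepB]
        have := ih (m+1) K (by omega) (by omega) (by omega) hhit
          (fun u hu1 hu2 => hok u (by omega) hu2)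
        push_cast at this ⊢
        convert this using 2

-- ===== VERDICT (by name: the statement is the Claim_ definition above) =====
theorem targetingGuess_spec : Claim_equal_targetingGuess := by
  intro i v board _ hPre
  obtain ⟨hi, hv, hany⟩ := hPre
  unfold Spec_targetingGuess targetingGuess targetingGuess_alt
  set i0 := PySem.List.pyGetD i 0 0
  set i1 := PySem.List.pyGetD i 1 0
  set dr := PySem.List.pyGetD v 0 0
  set dc := PySem.List.pyGetD v 1 0
  simp only [List.any_eq_true, List.mem_range, Bool.and_eq_true, List.all_eq_true] at hany
  obtain ⟨k, hkF, hhit, hok⟩ := hany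
  -- first step of both programs
  have hF : ∃ F' : Nat, pvFuel board = F' + 1 := ⟨4 * (board.map List.length).sum + 1, rfl⟩
  obtain ⟨F', hFeq⟩ := hF
  have hkF' : k < F' + 1 := by rw [hFeq] at hkF; exact hkF
  rw [hFeq]
  have hadd : pvAddVectors i v = [i0 + dr, i1 + dc] := by simp [pvAddVectors, i0, i1, dr, dc]
  rcases Nat.eq_zero_or_pos k with hk0 | hkpos
  · -- hit at the very first step: A returns i, B returns i (k = 1 branch)
    subst hk0
    simp only [pvHitB, Bool.or_eq_true, decide_eq_true_eq] at hhit
    norm_num at hhit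
    rcases hhit with h | h <;>
    · simp only [pvTgA, pvTgB, hadd, pvGet0, pvGet1, one_mul, h]
      simp
  · -- first step is a plain cell: A recurses, B advances; then loop_eq with m = 1, K = k + 1
    have hok1 : pvOkB board i0 i1 dr dc 1 = true := by
      have := hok 0 hkpos; push_cast at this
      simpa using this
    unfold pvOkB at hok1
    simp only [one_mul] at hok1
    rcases hc : pvCell board (i0 + dr) (i1 + dc) with _ | s
    · rw [hc] at hok1; simp at hok1
    · rw [hc] at hok1; simp at hok1
      obtain ⟨hso, hss⟩ := hok1
      have stepA : pvTgA (F' + 1) i v board = pvTgA F' [i0 + dr, i1 + dc] v board := by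
        simp only [pvTgA, hadd]
        simp [pvGet1, hc, hso, hss]
      have stepB : pvTgB (F' + 1) 1 i0 i1 dr dc i board = pvTgB F' 2 i0 i1 dr dc i board := by
        simp only [pvTgB, one_mul, hc]
        simp [hso, hss]
      rw [stepA, stepB]
      have hhit' : pvHitB board i0 i1 dr dc ((k + 1 : Nat) : Int) = true := by
        push_cast; push_cast at hhit; exact hhit
      have hok' : ∀ u : Nat, 1 < u → u < k + 1 → pvOkB board i0 i1 dr dc (u : Int) = true := by
        intro u hu1 hu2
        have h1 := hok (u - 1) (by omega)
        have hcast : u - 1 + 1 = u := by omega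
        rw [hcast] at h1; exact h1
      have := loop_eq board i v i0 i1 dr dc rfl rfl F' 1 (k + 1) (le_refl 1)
        (by omega) (by omega) hhit' hok'
      simpa using this
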